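-- pv_equiv track=rewrite | github.com/kol060k/Yandex_Algorithm_Training_2021 | HW4/E.py | highest_pyramid
-- ===== SOURCE A (Python) =====
-- def highest_pyramid(blocks):
--     # Будем составлять словарь блоков, где ширина - ключ, а высота - значение.
--     # Соответственно, в словаре будем хранить по 1 блоку с каждым значением ширины,
--     # так как в пирамиде не может быть двух блоков одной ширины.
--     # Будем запоминать только самый высокий блок
--     blocks_dict = {}
--     for w, h in blocks:
--         if w in blocks_dict:
--             if h > blocks_dict[w]:
--                 blocks_dict[w] = h
--         else:
--             blocks_dict[w] = h
--
--     sum_h = 0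
--     for w in blocks_dict:
--         sum_h += blocks_dict[w]
--     return sum_h
-- ===== SOURCE B (Python) =====
-- def highest_pyramid(blocks):
--     # sort by width, then one grouping sweep accumulating each group's max height
--     srt = sorted(blocks, key=lambda b: b[0])
--     if not srt:
--         return 0
--     total = 0
--     cur_w, best = srt[0]
--     for w, h in srt[1:]:
--         if w == cur_w:
--             if h > best:
--                 best = h
--         else:
--             total += best
--             cur_w, best = w, h
--     return total + best
-- ===== Notes on version B (the rewrite author's own statement) =====
-- stated objective: alternative
-- what changed: Replaces the width-keyed dict of running maxima plus a second summation loop by sorting a copy on width and doing one grouping sweep over the sorted list, accumulating each contiguous group's maximum height into the total.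
import Mathlib
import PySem

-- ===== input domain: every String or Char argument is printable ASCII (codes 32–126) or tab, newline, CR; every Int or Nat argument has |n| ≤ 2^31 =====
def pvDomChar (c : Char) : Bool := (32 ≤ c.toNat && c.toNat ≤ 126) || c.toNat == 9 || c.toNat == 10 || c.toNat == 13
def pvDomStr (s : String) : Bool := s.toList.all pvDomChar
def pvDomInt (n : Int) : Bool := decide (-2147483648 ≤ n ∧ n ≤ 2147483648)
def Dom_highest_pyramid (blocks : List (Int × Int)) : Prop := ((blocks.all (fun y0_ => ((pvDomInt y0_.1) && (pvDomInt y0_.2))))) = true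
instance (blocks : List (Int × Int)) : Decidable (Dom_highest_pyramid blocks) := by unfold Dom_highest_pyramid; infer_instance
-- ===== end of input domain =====

-- B replaces A's width-keyed dict of running maxima + second summation loop by a sort-by-width
-- and one grouping sweep (alternative decomposition; not claimed faster).


-- ===== PORT A =====
-- the dict-update step: if w in d: if h > d[w]: d[w] = h  else: d[w] = h
def stepA (d : PySem.Dict Int Int) (p : Int × Int) : PySem.Dict Int Int :=
  match d.get? p.1 with
  | some v => if p.2 > v then d.insert p.1 p.2 else d
  | none => d.insert p.1 p.2

def highest_pyramid (blocks : List (Int × Int)) : Int :=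
  let d := blocks.foldl stepA PySem.Dict.empty
  d.keys.foldl (fun s w => s + d.getD w 0) 0

-- ===== PORT B =====
-- the grouping sweep over the sorted tail: state (total, cur_w, best)
def sweepAux (total cur_w best : Int) : List (Int × Int) → Int
  | [] => total + best
  | p :: rest =>
      if p.1 = cur_w then sweepAux total cur_w (if p.2 > best then p.2 else best) rest
      else sweepAux (total + best) p.1 p.2 rest

def highest_pyramid_alt (blocks : List (Int × Int)) : Int :=
  match PySem.List.sorted blocks (fun b => b.1) false with
  | [] => 0
  | p :: rest => sweepAux 0 p.1 p.2 rest

-- ===== PRECONDITION & SPEC =====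
def Spec_highest_pyramid (blocks : List (Int × Int)) (out : Int) : Prop := out = highest_pyramid_alt blocks
instance (blocks : List (Int × Int)) (out : Int) : Decidable (Spec_highest_pyramid blocks out) := by unfold Spec_highest_pyramid; infer_instance

-- ===== CLAIM (what is proved, stated in full; the proofs are below) =====
def Claim_equal_highest_pyramid : Prop := ∀ (blocks : List (Int × Int)), Dom_highest_pyramid blocks → Spec_highest_pyramid blocks (highest_pyramid blocks)

-- ===== LEMMAS AND PROOFS =====

-- merge of optional maxima
def omerge : Option Int → Option Int → Option Int
  | none, b => b
  | some x, none => some x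
  | some x, some y => some (max x y)

-- max height among blocks of width w (none if no such block)
def mOpt (w : Int) : List (Int × Int) → Option Int
  | [] => none
  | p :: rest => if p.1 = w then omerge (some p.2) (mOpt w rest) else mOpt w rest

-- widths in order of first occurrence
def wlist : List (Int × Int) → List Int
  | [] => []
  | p :: rest => p.1 :: wlist (rest.filter (fun q => q.1 ≠ p.1))
  termination_by l => l.length
  decreasing_by simp; exact le_trans (List.length_filter_le _ _) (by simp)

-- value of B on a (sorted) list
def S : List (Int × Int) → Int
  | [] => 0
  | p :: rest => sweepAux 0 p.1 p.2 rest

theorem omerge_none_right (a : Option Int) : omerge a none = a := by cases a <;> rfl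

theorem omerge_assoc (a b c : Option Int) : omerge (omerge a b) c = omerge a (omerge b c) := by
  cases a <;> cases b <;> cases c <;> simp [omerge, max_assoc]

theorem mOpt_perm {l l' : List (Int × Int)} (h : l.Perm l') (w : Int) : mOpt w l = mOpt w l' := by
  induction h with
  | nil => rfl
  | cons x _ ih => simp [mOpt, ih]
  | swap x y l =>
      by_cases hx : x.1 = w <;> by_cases hy : y.1 = w <;>
        simp [mOpt, hx, hy]
      cases mOpt w l <;> simp [omerge, max_left_comm, max_comm]
  | trans _ _ ih1 ih2 => exact ih1.trans ih2

theorem mOpt_eq_none_iff (w : Int) (l : List (Int × Int)) :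
    mOpt w l = none ↔ w ∉ l.map Prod.fst := by
  induction l with
  | nil => simp [mOpt]
  | cons p rest ih =>
      by_cases hp : p.1 = w
      · simp only [mOpt, hp]
        cases mOpt w rest <;> simp [omerge, hp]
      · simp [mOpt, hp, ih, Ne.symm hp]

theorem mOpt_filter_ne (w w0 : Int) (hne : w ≠ w0) (l : List (Int × Int)) :
    mOpt w (l.filter (fun q => q.1 ≠ w0)) = mOpt w l := by
  induction l with
  | nil => rfl
  | cons p rest ih =>
      by_cases h0 : p.1 = w0
      · have hpw : ¬ p.1 = w := by rw [h0]; exact fun h => hne h.symm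
        rw [List.filter_cons_of_neg (by simp [h0])]
        rw [ih, mOpt, if_neg hpw]
      · rw [List.filter_cons_of_pos (by simp [h0])]
        by_cases hw : p.1 = w
        · rw [mOpt, if_pos hw, mOpt, if_pos hw, ih]
        · rw [mOpt, if_neg hw, mOpt, if_neg hw, ih]

theorem stepA_get? (d : PySem.Dict Int Int) (p : Int × Int) (w : Int) :
    (stepA d p).get? w = if p.1 = w then omerge (d.get? w) (some p.2) else d.get? w := by
  unfold stepA
  by_cases hw : p.1 = w
  · subst hw
    cases hv : d.get? p.1 with
    | none => simp [PySem.Dict.get?_insert_self, omerge]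
    | some v =>
        by_cases hgt : p.2 > v
        · simp [hgt, PySem.Dict.get?_insert_self, omerge, max_eq_right (le_of_lt hgt)]
        · simp [hgt, hv, omerge, max_eq_left (le_of_not_gt hgt)]
  · cases hv : d.get? p.1 with
    | none => simp [hw, PySem.Dict.get?_insert_of_ne _ _ (fun h => hw h.symm)]
    | some v =>
        by_cases hgt : p.2 > v <;>
          simp [hw, hgt, PySem.Dict.get?_insert_of_ne _ _ (fun h => hw h.symm)]

theorem foldA_get? (l : List (Int × Int)) (d : PySem.Dict Int Int) (w : Int) :
    (l.foldl stepA d).get? w = omerge (d.get? w) (mOpt w l) := by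
  induction l generalizing d with
  | nil => simp [omerge_none_right, mOpt]
  | cons p rest ih =>
      simp only [List.foldl_cons, ih, stepA_get?, mOpt]
      by_cases hp : p.1 = w
      · simp [hp, omerge_assoc]
      · simp [hp]

theorem stepA_nodup (d : PySem.Dict Int Int) (p : Int × Int) (h : d.keys.Nodup) :
    (stepA d p).keys.Nodup := by
  unfold stepA
  cases d.get? p.1 with
  | none => exact PySem.Dict.nodup_keys_insert _ _ _ h
  | some v =>
      by_cases hgt : p.2 > v
      · simpa [hgt] using PySem.Dict.nodup_keys_insert d p.1 p.2 h
      · simpa [hgt] using h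

theorem foldA_nodup (l : List (Int × Int)) (d : PySem.Dict Int Int) (h : d.keys.Nodup) :
    (l.foldl stepA d).keys.Nodup := by
  induction l generalizing d with
  | nil => exact h
  | cons p rest ih => exact ih _ (stepA_nodup d p h)

theorem wlist_mem_aux (n : ℕ) : ∀ (l : List (Int × Int)) (x : Int), l.length ≤ n →
    (x ∈ wlist l ↔ x ∈ l.map Prod.fst) := by
  induction n with
  | zero =>
      intro l x hl
      have : l = [] := List.eq_nil_of_length_eq_zero (Nat.le_zero.1 hl)
      subst this; simp [wlist]
  | succ n ih =>
      intro l x hl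
      cases l with
      | nil => simp [wlist]
      | cons p rest =>
          rw [wlist]
          have hlen : (rest.filter (fun q => q.1 ≠ p.1)).length ≤ n :=
            le_trans (List.length_filter_le _ _) (Nat.le_of_succ_le_succ hl)
          by_cases hx : x = p.1
          · simp [hx]
          · simp only [List.mem_cons, List.map_cons]
            rw [ih _ x hlen]
            constructor
            · rintro (h | h)
              · exact Or.inl h
              · right
                simp only [List.mem_map, List.mem_filter] at h ⊢
                rcases h with ⟨q, ⟨hq, _⟩, hq1⟩
                exact ⟨q, hq, hq1⟩
            · rintro (h | h)
              · exact absurd h hx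
              · right
                simp only [List.mem_map, List.mem_filter] at h ⊢
                rcases h with ⟨q, hq, hq1⟩
                exact ⟨q, ⟨hq, by simp; rw [hq1]; exact hx⟩, hq1⟩
theorem wlist_mem (x : Int) (l : List (Int × Int)) : x ∈ wlist l ↔ x ∈ l.map Prod.fst :=
  wlist_mem_aux l.length l x le_rfl
theorem wlist_nodup_aux (n : ℕ) : ∀ (l : List (Int × Int)), l.length ≤ n → (wlist l).Nodup := by
  induction n with
  | zero =>
      intro l hl
      have : l = [] := List.eq_nil_of_length_eq_zero (Nat.le_zero.1 hl)
      subst this; simp [wlist]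
  | succ n ih =>
      intro l hl
      cases l with
      | nil => simp [wlist]
      | cons p rest =>
          rw [wlist]
          have hlen : (rest.filter (fun q => q.1 ≠ p.1)).length ≤ n :=
            le_trans (List.length_filter_le _ _) (Nat.le_of_succ_le_succ hl)
          refine List.Nodup.cons ?_ (ih _ hlen)
          intro hmem
          rcases List.mem_map.1 ((wlist_mem _ _).1 hmem) with ⟨q, hq, hq1⟩
          rcases List.mem_filter.1 hq with ⟨_, hq2⟩
          simp at hq2
          exact hq2 hq1
theorem wlist_nodup (l : List (Int × Int)) : (wlist l).Nodup := wlist_nodup_aux l.length l le_rfl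

theorem sweepAux_total (rest : List (Int × Int)) (t w best : Int) :
    sweepAux t w best rest = t + sweepAux 0 w best rest := by
  induction rest generalizing t w best with
  | nil => simp [sweepAux]
  | cons p r ih =>
      by_cases hp : p.1 = w
      · rw [sweepAux, if_pos hp, sweepAux, if_pos hp, ih]
      · rw [sweepAux, if_neg hp, sweepAux, if_neg hp, ih (t + best) p.1 p.2,
          ih (0 + best) p.1 p.2]
        omega
theorem sweepAux_group (rest : List (Int × Int)) (cw : Int) :
    ∀ (total best : Int), rest.Pairwise (fun a b => a.1 ≤ b.1) → (∀ q ∈ rest, cw ≤ q.1) →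
    sweepAux total cw best rest =
      total + (omerge (some best) (mOpt cw rest)).getD 0 +
        S (rest.filter (fun q => q.1 ≠ cw)) := by
  induction rest with
  | nil => intro total best _ _; simp [sweepAux, S, omerge, mOpt]
  | cons p r ih =>
      intro total best hp hb
      rcases List.pairwise_cons.1 hp with ⟨hhead, htail⟩
      by_cases hpw : p.1 = cw
      · have hb' : ∀ q ∈ r, cw ≤ q.1 := fun q hq => hb q (List.mem_cons_of_mem _ hq)
        have hmax : (if p.2 > best then p.2 else best) = max best p.2 := by
          by_cases h : p.2 > best <;> simp [h] <;> omega
        have h1 : omerge (some best) (omerge (some p.2) (mOpt cw r))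
            = omerge (some (max best p.2)) (mOpt cw r) := by
          rw [← omerge_assoc]; rfl
        rw [sweepAux, if_pos hpw, hmax, ih total (max best p.2) htail hb',
          show mOpt cw (p :: r) = omerge (some p.2) (mOpt cw r) by rw [mOpt, if_pos hpw],
          h1, List.filter_cons_of_neg (by simp [hpw])]
      · have hlt : cw < p.1 := lt_of_le_of_ne (hb p List.mem_cons_self) (fun h => hpw h.symm)
        have hnone : mOpt cw (p :: r) = none := by
          rw [mOpt_eq_none_iff]
          intro hmem
          rcases List.mem_map.1 hmem with ⟨q, hq, hq1⟩
          rcases List.mem_cons.1 hq with h | h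
          · subst h; omega
          · have := hhead q h; omega
        have hfilt : (p :: r).filter (fun q => q.1 ≠ cw) = p :: r := by
          rw [List.filter_eq_self]
          intro q hq
          rcases List.mem_cons.1 hq with h | h
          · subst h; simp; omega
          · have := hhead q h; simp; omega
        rw [sweepAux, if_neg hpw, hnone, hfilt, sweepAux_total]
        show total + best + sweepAux 0 p.1 p.2 r = _
        rw [show S (p :: r) = sweepAux 0 p.1 p.2 r from rfl]
        simp [omerge]

theorem S_eq (n : ℕ) : ∀ l : List (Int × Int), l.length ≤ n →
    l.Pairwise (fun a b => a.1 ≤ b.1) →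
    S l = ((wlist l).map (fun w => (mOpt w l).getD 0)).sum := by
  induction n with
  | zero =>
      intro l hl _
      have : l = [] := List.eq_nil_of_length_eq_zero (Nat.le_zero.1 hl)
      subst this; simp [S, wlist]
  | succ n ih =>
      intro l hl hp
      cases l with
      | nil => simp [S, wlist]
      | cons p rest =>
          rcases List.pairwise_cons.1 hp with ⟨hhead, htail⟩
          have hb : ∀ q ∈ rest, p.1 ≤ q.1 := hhead
          have hS : S (p :: rest) = sweepAux 0 p.1 p.2 rest := rfl
          rw [hS, sweepAux_group rest p.1 0 p.2 htail hb]
          have hrec := ih (rest.filter (fun q => q.1 ≠ p.1))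
            (le_trans (List.length_filter_le _ _) (Nat.le_of_succ_le_succ hl))
            (htail.filter _)
          rw [hrec]
          have hwl : wlist (p :: rest) = p.1 :: wlist (rest.filter (fun q => q.1 ≠ p.1)) := by
            rw [wlist]
          rw [hwl, List.map_cons, List.sum_cons]
          have hmap : ((wlist (rest.filter (fun q => q.1 ≠ p.1))).map
                (fun w => (mOpt w (rest.filter (fun q => q.1 ≠ p.1))).getD 0))
              = ((wlist (rest.filter (fun q => q.1 ≠ p.1))).map
                (fun w => (mOpt w (p :: rest)).getD 0)) := by
            apply List.map_congr_left
            intro w hw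
            have hw' : w ∈ (rest.filter (fun q => q.1 ≠ p.1)).map Prod.fst :=
              (wlist_mem _ _).1 hw
            have hwne : w ≠ p.1 := by
              rcases List.mem_map.1 hw' with ⟨q, hq, hq1⟩
              rcases List.mem_filter.1 hq with ⟨_, hq2⟩
              simp at hq2
              rw [← hq1]; exact hq2
            rw [mOpt_filter_ne w p.1 hwne]
            have hne' : ¬ p.1 = w := fun h => hwne h.symm
            rw [show mOpt w (p :: rest) = mOpt w rest by rw [mOpt, if_neg hne']]
          rw [← hmap]
          have hfirst : (mOpt p.1 (p :: rest)).getD 0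
              = (omerge (some p.2) (mOpt p.1 rest)).getD 0 := by
            simp [mOpt]
          rw [hfirst]
          ring

-- A's value as a sum over its key list
theorem A_eq (blocks : List (Int × Int)) :
    highest_pyramid blocks
      = (((blocks.foldl stepA PySem.Dict.empty).keys).map
          (fun w => (mOpt w blocks).getD 0)).sum := by
  unfold highest_pyramid
  have h1 : ∀ (ks : List Int) (d : PySem.Dict Int Int) (s : Int),
      ks.foldl (fun s w => s + d.getD w 0) s = s + (ks.map (fun w => d.getD w 0)).sum := by
    intro ks
    induction ks with
    | nil => simp
    | cons k t ih => intro d s; simp [ih]; ring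
  rw [h1]
  simp only [zero_add]
  apply congrArg
  apply List.map_congr_left
  intro w _
  rw [PySem.Dict.getD_eq_get?_getD, foldA_get?, PySem.Dict.get?_empty]
  rfl

-- ===== VERDICT (by name: the statement is the Claim_ definition above) =====
theorem highest_pyramid_spec : Claim_equal_highest_pyramid := by
  intro blocks _
  unfold Spec_highest_pyramid
  have hperm : (PySem.List.sorted blocks (fun b => b.1) false).Perm blocks :=
    PySem.List.sorted_perm blocks _ false
  have hpair : (PySem.List.sorted blocks (fun b => b.1) false).Pairwise (fun a b => a.1 ≤ b.1) :=
    PySem.List.sorted_pairwise blocks _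
  have hBS : highest_pyramid_alt blocks
      = S (PySem.List.sorted blocks (fun b => b.1) false) := by
    unfold highest_pyramid_alt S
    cases PySem.List.sorted blocks (fun b => b.1) false <;> rfl
  rw [hBS, S_eq (PySem.List.sorted blocks (fun b => b.1) false).length _ le_rfl hpair, A_eq]
  have hmapf : ((wlist (PySem.List.sorted blocks (fun b => b.1) false)).map
        (fun w => (mOpt w (PySem.List.sorted blocks (fun b => b.1) false)).getD 0))
      = ((wlist (PySem.List.sorted blocks (fun b => b.1) false)).map
        (fun w => (mOpt w blocks).getD 0)) := by
    apply List.map_congr_left; intro w _; rw [mOpt_perm hperm]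
  rw [hmapf]
  have hkeysperm : ((blocks.foldl stepA PySem.Dict.empty).keys).Perm
      (wlist (PySem.List.sorted blocks (fun b => b.1) false)) := by
    rw [List.perm_ext_iff_of_nodup
      (foldA_nodup blocks _ (by simp)) (wlist_nodup _)]
    intro w
    rw [wlist_mem]
    have hmem : w ∈ (blocks.foldl stepA PySem.Dict.empty).keys
        ↔ ¬ (blocks.foldl stepA PySem.Dict.empty).get? w = none := by
      rw [PySem.Dict.get?_eq_none_iff_not_mem_keys, not_not]
    rw [hmem, foldA_get?, PySem.Dict.get?_empty]
    have h0 : omerge none (mOpt w blocks) = mOpt w blocks := rfl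
    rw [h0, mOpt_eq_none_iff, not_not]
    have hmm : w ∈ (PySem.List.sorted blocks (fun b => b.1) false).map Prod.fst
        ↔ w ∈ blocks.map Prod.fst := (hperm.map Prod.fst).mem_iff
    exact hmm.symm
  exact (hkeysperm.map _).sum_eq
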